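-- pv_equiv track=rewrite | github.com/Kuree/cgra_pnr | place_benchmark.py | get_num_clusters
-- ===== SOURCE A (Python) =====
-- def get_num_clusters(id_to_name):
--     unique_names = set()
--     for blk_id in id_to_name:
--         blk_name = id_to_name[blk_id]
--         name = blk_name.split(".")[0]
--         name = name.split("$")[0]
--         unique_names.add(name)
--
--     count = [1 for name in unique_names if name[:2] == "lb" and
--              "lut" not in name]
--     return sum(count)
-- ===== SOURCE B (Python) =====
-- def get_num_clusters(id_to_name):
--     names = sorted(v.split(".")[0].split("$")[0] for v in id_to_name.values())
--     count = 0
--     prev = None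
--     for name in names:
--         if name != prev and name[:2] == "lb" and "lut" not in name:
--             count += 1
--         prev = name
--     return count
-- ===== Notes on version B (the rewrite author's own statement) =====
-- stated objective: alternative
-- what changed: B replaces A's hash-set deduplication plus filtering comprehension with a sort-then-scan: it sorts the normalized names and counts adjacent-distinct qualifying names in one linear scan with a prev accumulator, using no set at all.
import Mathlib
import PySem

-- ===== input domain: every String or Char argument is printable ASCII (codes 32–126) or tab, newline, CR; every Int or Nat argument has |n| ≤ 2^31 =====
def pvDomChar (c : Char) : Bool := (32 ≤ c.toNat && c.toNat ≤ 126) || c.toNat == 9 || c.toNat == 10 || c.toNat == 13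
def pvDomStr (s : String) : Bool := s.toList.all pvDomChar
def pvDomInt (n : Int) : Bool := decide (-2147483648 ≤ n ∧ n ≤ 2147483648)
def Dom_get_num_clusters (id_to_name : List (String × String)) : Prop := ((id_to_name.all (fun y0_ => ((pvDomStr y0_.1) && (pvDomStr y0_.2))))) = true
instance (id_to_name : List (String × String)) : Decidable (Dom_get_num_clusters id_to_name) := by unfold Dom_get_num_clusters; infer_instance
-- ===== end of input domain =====

-- B is a sort-then-scan: it sorts the normalized names and counts adjacent-distinct qualifying names
-- with a prev accumulator, using no set; objective: alternative (same task, different algorithm).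

-- ===== PORT A =====
-- `blk_name.split(".")[0]`: split with a non-empty separator never returns an empty list, so [0] is `.headD ""` (total, exact).
def get_num_clusters (id_to_name : List (String × String)) : Int :=
  let d := PySem.Dict.ofList id_to_name
  let unique_names := d.keys.foldl (fun unique_names blk_id =>
      let blk_name := d.getD blk_id ""
      let name := ((PySem.Str.split? blk_name ".").getD []).headD ""
      let name := ((PySem.Str.split? name "$").getD []).headD ""
      PySem.Set.add unique_names name) PySem.Set.empty
  -- [1 for name in unique_names if …]: the sum is order-independent, so iterating the Set is exact
  let count := (unique_names.filter (fun name =>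
      PySem.Str.slice name none (some 2) == "lb" && !(PySem.Str.isIn "lut" name))).map (fun _ => (1 : Int))
  count.sum

-- ===== PORT B =====
-- sorted(generator) = sorted of the mapped value list; the scan keeps (count, prev) with prev : Option String (None at start).
def get_num_clusters_alt (id_to_name : List (String × String)) : Int :=
  let d := PySem.Dict.ofList id_to_name
  let names := PySem.List.sorted (d.values.map (fun v =>
      ((PySem.Str.split? (((PySem.Str.split? v ".").getD []).headD "") "$").getD []).headD "")) (fun x => x) false
  let r := names.foldl (fun (st : Int × Option String) name =>
      (if (st.2 != some name) &&
          (PySem.Str.slice name none (some 2) == "lb" && !(PySem.Str.isIn "lut" name))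
       then st.1 + 1 else st.1, some name)) ((0 : Int), (none : Option String))
  r.1

-- ===== PRECONDITION & SPEC =====
def Spec_get_num_clusters (id_to_name : List (String × String)) (out : Int) : Prop := out = get_num_clusters_alt id_to_name
instance (id_to_name : List (String × String)) (out : Int) : Decidable (Spec_get_num_clusters id_to_name out) := by unfold Spec_get_num_clusters; infer_instance

-- ===== CLAIM (what is proved, stated in full; the proofs are below) =====
def Claim_equal_get_num_clusters : Prop := ∀ (id_to_name : List (String × String)), Dom_get_num_clusters id_to_name → Spec_get_num_clusters id_to_name (get_num_clusters id_to_name)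

-- ===== LEMMAS AND PROOFS =====

-- the normalization and the filter predicate, named for the proofs
def pvNorm (s : String) : String :=
  ((PySem.Str.split? (((PySem.Str.split? s ".").getD []).headD "") "$").getD []).headD ""

def pvPred (name : String) : Bool :=
  PySem.Str.slice name none (some 2) == "lb" && !(PySem.Str.isIn "lut" name)

-- the distinct elements B's scan actually counts: drop an element equal to prev, otherwise keep it and make it prev
def pvDAux : Option String → List String → List String
  | _, [] => []
  | pr, b :: t => if some b = pr then pvDAux pr t else b :: pvDAux (some b) t

-- B's (count, prev) fold counts exactly the qualifying elements of pvDAux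
lemma scan_eq_countP (s : List String) : ∀ (c : Int) (pr : Option String),
    (s.foldl (fun (st : Int × Option String) name =>
        (if (st.2 != some name) && pvPred name then st.1 + 1 else st.1, some name)) (c, pr)).1
      = c + ((pvDAux pr s).countP pvPred : Int) := by
  induction s with
  | nil => intro c pr; simp [pvDAux]
  | cons b t ih =>
      intro c pr
      rw [List.foldl_cons]
      change (List.foldl _ (if ((pr != some b) && pvPred b) = true then c + 1 else c, some b) t).1 = _
      by_cases h : some b = pr
      · subst h
        rw [show ((some b != some b) && pvPred b) = false from by simp, if_neg (by simp)]
        rw [ih, pvDAux, if_pos rfl]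
      · have hne : (pr != some b) = true := by
          simp only [bne_iff_ne, ne_eq]; exact fun he => h he.symm
        rw [hne, Bool.true_and]
        by_cases hp : pvPred b
        · rw [if_pos hp, ih, pvDAux, if_neg h, List.countP_cons, if_pos hp]
          push_cast; ring
        · rw [if_neg (by simp [hp]), ih, pvDAux, if_neg h, List.countP_cons, if_neg (by simp [hp])]
          push_cast; ring

-- on a sorted list whose elements all dominate prev, pvDAux keeps exactly the distinct elements ≠ prev
lemma mem_pvDAux (s : List String) (hs : s.Pairwise (· ≤ ·)) :
    ∀ (pr : Option String), (∀ a, pr = some a → ∀ x ∈ s, a ≤ x) →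
      ∀ x, x ∈ pvDAux pr s ↔ x ∈ s ∧ some x ≠ pr := by
  induction s with
  | nil => intro pr _ x; simp [pvDAux]
  | cons b t ih =>
      intro pr hpr x
      have hb : ∀ y ∈ t, b ≤ y := (List.pairwise_cons.mp hs).1
      have ht : t.Pairwise (· ≤ ·) := (List.pairwise_cons.mp hs).2
      by_cases h : some b = pr
      · rw [pvDAux, if_pos h]
        rw [ih ht pr (fun a ha y hy => hpr a ha y (List.mem_cons_of_mem b hy)) x]
        constructor
        · rintro ⟨hx, hne⟩; exact ⟨List.mem_cons_of_mem b hx, hne⟩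
        · rintro ⟨hx, hne⟩
          rcases List.mem_cons.mp hx with rfl | hx
          · exact (hne h).elim
          · exact ⟨hx, hne⟩
      · rw [pvDAux, if_neg h]
        rw [List.mem_cons, ih ht (some b) (fun a ha y hy => by cases ha; exact hb y hy) x]
        constructor
        · rintro (rfl | ⟨hx, hne⟩)
          · exact ⟨List.mem_cons_self, fun he => h he⟩
          · refine ⟨List.mem_cons_of_mem b hx, ?_⟩
            rcases pr with _ | a
            · simp
            · intro he
              have ha : a ≤ b := hpr a rfl b List.mem_cons_self
              have hab : a ≠ b := fun he2 => h (by rw [he2])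
              have hbx : b ≤ x := hb x hx
              have hxa : x = a := by injection he
              subst hxa
              exact hab (le_antisymm ha hbx)
        · rintro ⟨hx, hne⟩
          rcases List.mem_cons.mp hx with rfl | hx
          · exact Or.inl rfl
          · by_cases hxb : x = b
            · exact Or.inl hxb
            · exact Or.inr ⟨hx, by simpa using hxb⟩

lemma nodup_pvDAux (s : List String) (hs : s.Pairwise (· ≤ ·)) :
    ∀ (pr : Option String), (∀ a, pr = some a → ∀ x ∈ s, a ≤ x) →
      (pvDAux pr s).Nodup := by
  induction s with
  | nil => intro pr _; simp [pvDAux]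
  | cons b t ih =>
      intro pr hpr
      have hb : ∀ y ∈ t, b ≤ y := (List.pairwise_cons.mp hs).1
      have ht : t.Pairwise (· ≤ ·) := (List.pairwise_cons.mp hs).2
      by_cases h : some b = pr
      · rw [pvDAux, if_pos h]
        exact ih ht pr (fun a ha y hy => hpr a ha y (List.mem_cons_of_mem b hy))
      · rw [pvDAux, if_neg h]
        refine List.nodup_cons.mpr ⟨?_, ih ht (some b) (fun a ha y hy => by cases ha; exact hb y hy)⟩
        intro hmem
        have hch := (mem_pvDAux t ht (some b) (fun a ha y hy => by cases ha; exact hb y hy) b).mp hmem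
        exact hch.2 rfl

lemma get_num_clusters_sum_aux (l : List String) :
    ((l.map (fun _ => (1 : Int))).sum) = (l.length : Int) := by
  induction l with
  | nil => simp
  | cons x xs ih =>
      rw [List.map_cons, List.sum_cons, ih, List.length_cons]
      push_cast; ring

-- ===== VERDICT (by name: the statement is the Claim_ definition above) =====
theorem get_num_clusters_spec : Claim_equal_get_num_clusters := by
  intro l _
  show get_num_clusters l = get_num_clusters_alt l
  have hnd : (PySem.Dict.ofList l).keys.Nodup := PySem.Dict.nodup_keys_ofList l
  -- A = |filter pvPred (set of normalized names)|
  have hA : get_num_clusters l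
      = ((((PySem.Set.ofList ((PySem.Dict.ofList l).values.map pvNorm)).filter pvPred)).length : Int) := by
    show ((((PySem.Dict.ofList l).keys.foldl
            (fun u k => PySem.Set.add u (pvNorm ((PySem.Dict.ofList l).getD k "")))
            PySem.Set.empty).filter pvPred).map (fun _ => (1 : Int))).sum = _
    rw [← PySem.Set.update_map_eq_foldl_add,
      show (PySem.Set.empty : PySem.Set String) = [] from rfl, PySem.Set.update_nil_left,
      get_num_clusters_sum_aux,
      PySem.Dict.values_eq_map_keys (PySem.Dict.ofList l) hnd "", List.map_map]
    rfl
  -- B = countP pvPred over the adjacent-distinct elements of the sorted list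
  have hB : get_num_clusters_alt l
      = (((pvDAux none (PySem.List.sorted ((PySem.Dict.ofList l).values.map pvNorm) (fun x => x) false)).countP pvPred : Nat) : Int) := by
    show ((PySem.List.sorted ((PySem.Dict.ofList l).values.map pvNorm) (fun x => x) false).foldl
        (fun (st : Int × Option String) name =>
          (if (st.2 != some name) && pvPred name then st.1 + 1 else st.1, some name))
        ((0 : Int), (none : Option String))).1 = _
    rw [scan_eq_countP]; ring
  rw [hA, hB]
  -- both count the distinct qualifying names
  have hsp : (PySem.List.sorted ((PySem.Dict.ofList l).values.map pvNorm) (fun x => x) false).Pairwise (· ≤ ·) :=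
    PySem.List.sorted_pairwise ((PySem.Dict.ofList l).values.map pvNorm) (fun x => x)
  have hnone : ∀ a : String, (none : Option String) = some a →
      ∀ x ∈ PySem.List.sorted ((PySem.Dict.ofList l).values.map pvNorm) (fun x => x) false, a ≤ x := by
    intro a ha; cases ha
  have hperm : (PySem.Set.ofList ((PySem.Dict.ofList l).values.map pvNorm)).Perm
      (pvDAux none (PySem.List.sorted ((PySem.Dict.ofList l).values.map pvNorm) (fun x => x) false)) := by
    rw [List.perm_ext_iff_of_nodup (PySem.Set.nodup_ofList _) (nodup_pvDAux _ hsp none hnone)]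
    intro x
    rw [PySem.Set.mem_ofList, mem_pvDAux _ hsp none hnone x]
    have hms : x ∈ PySem.List.sorted ((PySem.Dict.ofList l).values.map pvNorm) (fun x => x) false
        ↔ x ∈ (PySem.Dict.ofList l).values.map pvNorm :=
      (PySem.List.sorted_perm ((PySem.Dict.ofList l).values.map pvNorm) (fun x => x) false).mem_iff
    simp [hms]
  rw [List.countP_eq_length_filter, (hperm.filter pvPred).length_eq]
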